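-- pv_equiv track=rewrite | github.com/G3orge26/sapling | mercurial/match.py | _patternrootsanddirs
-- ===== SOURCE A (Python) =====
-- def _patternrootsanddirs(kindpats):
--     '''Returns roots and directories corresponding to each pattern.
--
--     This calculates the roots and directories exactly matching the patterns and
--     returns a tuple of (roots, dirs) for each. It does not return other
--     directories which may also need to be considered, like the parent
--     directories.
--     '''
--     r = []
--     d = []
--     for kind, pat, source in kindpats:
--         if kind == 'glob': # find the non-glob prefix
--             root = []
--             for p in pat.split('/'):
--                 if '[' in p or '{' in p or '*' in p or '?' in p:
--                     break
--                 root.append(p)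
--             r.append('/'.join(root) or '.')
--         elif kind in ('relpath', 'path'):
--             r.append(pat or '.')
--         elif kind in ('rootfilesin',):
--             d.append(pat or '.')
--         else: # relglob, re, relre
--             r.append('.')
--     return r, d
-- ===== SOURCE B (Python) =====
-- def _patternrootsanddirs(kindpats):
--     '''Same result as A, by a different decomposition: the glob prefix is found
--     by a single character scan tracking the last '/' before the first glob
--     metacharacter (instead of splitting on '/'), and roots/dirs are built by
--     two filtered comprehensions instead of one accumulator loop.'''
--     def _globroot(pat):
--         last_slash = -1
--         for j, c in enumerate(pat):
--             if c in '[{*?':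
--                 return pat[:last_slash] if last_slash >= 0 else ''
--             if c == '/':
--                 last_slash = j
--         return pat
--
--     def _root(kind, pat):
--         if kind == 'glob':
--             return _globroot(pat) or '.'
--         if kind in ('relpath', 'path'):
--             return pat or '.'
--         return '.'  # relglob, re, relre
--
--     r = [_root(kind, pat) for kind, pat, _ in kindpats if kind != 'rootfilesin']
--     d = [pat or '.' for kind, pat, _ in kindpats if kind == 'rootfilesin']
--     return r, d
-- ===== Notes on version B (the rewrite author's own statement) =====
-- stated objective: simpler
-- what changed: The glob non-glob prefix is found by one character scan remembering the last '/' seen before the first metacharacter (no split/join over components), and the roots and dirs lists are built by two filtered comprehensions instead of one loop appending to two accumulators.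
import Mathlib
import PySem

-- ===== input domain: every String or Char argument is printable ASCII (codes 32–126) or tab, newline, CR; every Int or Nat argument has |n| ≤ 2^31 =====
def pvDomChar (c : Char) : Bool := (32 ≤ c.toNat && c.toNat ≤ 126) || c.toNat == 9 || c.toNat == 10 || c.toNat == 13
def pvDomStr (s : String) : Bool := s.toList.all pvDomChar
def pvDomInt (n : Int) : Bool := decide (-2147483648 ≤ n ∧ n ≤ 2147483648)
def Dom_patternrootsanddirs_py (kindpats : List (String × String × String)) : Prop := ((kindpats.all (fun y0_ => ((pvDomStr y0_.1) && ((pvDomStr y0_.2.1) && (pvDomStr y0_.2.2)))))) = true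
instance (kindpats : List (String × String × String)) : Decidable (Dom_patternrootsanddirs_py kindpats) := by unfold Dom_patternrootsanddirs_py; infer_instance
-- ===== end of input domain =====

-- B replaces A's split-on-'/'-then-break glob-prefix computation by a single character
-- scan remembering the last '/' before the first metacharacter, and builds r/d by two
-- filtered maps instead of one accumulator loop; same results, objective: simpler.

-- `x or '.'` on a string (shared by both ports: both Pythons write `… or '.'`)
def pyOrDot (cs : List Char) : List Char := if cs = [] then ['.'] else cs

-- ===== PORT A =====
-- "'[' in p or '{' in p or '*' in p or '?' in p"
def aHasMeta (p : List Char) : Bool :=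
  PySem.Chars.isIn ['['] p || PySem.Chars.isIn ['{'] p || PySem.Chars.isIn ['*'] p || PySem.Chars.isIn ['?'] p

-- the inner "for p in pat.split('/'): … break … root.append(p)" loop
def aGlobRoot : List (List Char) → List (List Char)
  | [] => []
  | p :: ps => if aHasMeta p then [] else p :: aGlobRoot ps

-- "'/'.join(root) or '.'" for a glob pattern
def aGlob (pat : String) : String :=
  String.ofList (pyOrDot (PySem.Chars.join ['/'] (aGlobRoot (PySem.Chars.splitOn pat.toList ['/']))))

-- the main loop with its two accumulators r, d
def aLoop : List (String × String × String) → List String → List String → List String × List String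
  | [], r, d => (r, d)
  | (kind, pat, _src) :: rest, r, d =>
    if kind == "glob" then aLoop rest (r ++ [aGlob pat]) d
    else if kind == "relpath" || kind == "path" then aLoop rest (r ++ [String.ofList (pyOrDot pat.toList)]) d
    else if kind == "rootfilesin" then aLoop rest r (d ++ [String.ofList (pyOrDot pat.toList)])
    else aLoop rest (r ++ [String.ofList ['.']]) d

def patternrootsanddirs_py (kindpats : List (String × String × String)) : List String × List String :=
  aLoop kindpats [] []

-- ===== PORT B =====
-- "c in '[{*?'"
def bMeta (c : Char) : Bool := c == '[' || c == '{' || c == '*' || c == '?'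

-- the "for j, c in enumerate(pat)" scan of _globroot; last_slash is the Python int ls
def bScan (pat : List Char) : List Char → Int → Int → List Char
  | [], _, _ => pat
  | c :: rest, j, ls =>
    if bMeta c then (if 0 ≤ ls then PySem.List.slice pat none (some ls) else [])
    else bScan pat rest (j + 1) (if c == '/' then j else ls)

def bGlobRoot (pat : String) : List Char := bScan pat.toList pat.toList 0 (-1)

-- _root(kind, pat)
def bRoot (kind pat : String) : String :=
  if kind == "glob" then String.ofList (pyOrDot (bGlobRoot pat))
  else if kind == "relpath" || kind == "path" then String.ofList (pyOrDot pat.toList)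
  else String.ofList ['.']

def patternrootsanddirs_py_alt (kindpats : List (String × String × String)) : List String × List String :=
  ((kindpats.filter (fun y => y.1 != "rootfilesin")).map (fun y => bRoot y.1 y.2.1),
   (kindpats.filter (fun y => y.1 == "rootfilesin")).map (fun y => String.ofList (pyOrDot y.2.1.toList)))

-- ===== PRECONDITION & SPEC =====
def Spec_patternrootsanddirs_py (kindpats : List (String × String × String)) (out : List String × List String) : Prop := out = patternrootsanddirs_py_alt kindpats
instance (kindpats : List (String × String × String)) (out : List String × List String) : Decidable (Spec_patternrootsanddirs_py kindpats out) := by unfold Spec_patternrootsanddirs_py; infer_instance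

-- ===== CLAIM (what is proved, stated in full; the proofs are below) =====
def Claim_equal_patternrootsanddirs_py : Prop := ∀ (kindpats : List (String × String × String)), Dom_patternrootsanddirs_py kindpats → Spec_patternrootsanddirs_py kindpats (patternrootsanddirs_py kindpats)

-- ===== LEMMAS AND PROOFS =====

-- structural version of pat.split('/')
def mySplit : List Char → List (List Char)
  | [] => [[]]
  | c :: cs => if c = '/' then [] :: mySplit cs
               else match mySplit cs with
                    | [] => [[c]]
                    | p :: ps => (c :: p) :: ps

-- reference description of the glob prefix: none = no metachar anywhere;
-- some none = metachar before any '/'; some (some p) = prefix up to the last '/' before the first metachar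
def refG : List Char → Option (Option (List Char))
  | [] => none
  | c :: cs =>
    if bMeta c then some none
    else match refG cs with
         | none => none
         | some none => if c = '/' then some (some []) else some none
         | some (some p) => some (some (c :: p))

theorem mySplit_ne_nil (cs : List Char) : mySplit cs ≠ [] := by
  cases cs with
  | nil => simp [mySplit]
  | cons c cs =>
    simp only [mySplit]
    split
    · simp
    · split <;> simp_all

theorem splitOn_go_char (fuel : Nat) :
    ∀ (l cur : List Char) (acc : List (List Char)), l.length < fuel →
      PySem.Chars.splitOn.go ['/'] fuel l cur acc =
        acc.reverse ++ (match mySplit l with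
                        | [] => []
                        | p :: ps => (cur.reverse ++ p) :: ps) := by
  induction fuel with
  | zero => intro l cur acc h; omega
  | succ fuel ih =>
    intro l cur acc h
    cases l with
    | nil =>
      rw [PySem.Chars.splitOn.go]
      all_goals simp [mySplit]
    | cons c rest =>
      rw [PySem.Chars.splitOn.go]
      by_cases hc : c = '/'
      · subst hc
        simp only [List.isPrefixOf]
        rw [if_pos (by simp)]
        rw [ih _ _ _ (by simpa using Nat.lt_of_succ_lt_succ h)]
        simp [mySplit]
        cases hms : mySplit rest with
        | nil => simp
        | cons p ps => simp
      · rw [if_neg (by simp [List.isPrefixOf]; intro h'; exact hc h'.symm)]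
        rw [ih _ _ _ (by simpa using Nat.lt_of_succ_lt_succ h)]
        simp only [mySplit, if_neg hc]
        cases hms : mySplit rest with
        | nil => exact absurd hms (mySplit_ne_nil rest)
        | cons p ps => simp

theorem splitOn_char (cs : List Char) : PySem.Chars.splitOn cs ['/'] = mySplit cs := by
  unfold PySem.Chars.splitOn
  rw [splitOn_go_char _ _ _ _ (by omega)]
  cases h : mySplit cs with
  | nil => exact absurd h (mySplit_ne_nil cs)
  | cons p ps => simp

theorem aHasMeta_eq (p : List Char) : aHasMeta p = p.any bMeta := by
  unfold aHasMeta
  by_cases h : ∃ c ∈ p, bMeta c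
  · obtain ⟨c, hc, hm⟩ := h
    have : p.any bMeta = true := List.any_eq_true.mpr ⟨c, hc, hm⟩
    rw [this]
    simp only [bMeta, Bool.or_eq_true, beq_iff_eq] at hm
    rcases hm with ((h|h)|h)|h <;> subst h <;>
      simp [PySem.Chars.isIn_iff_infix, List.singleton_infix_iff, hc]
  · have hall : p.any bMeta = false := by
      simp only [List.any_eq_false]; intro x hx; by_contra hb
      exact h ⟨x, hx, by simpa using hb⟩
    rw [hall]
    simp only [Bool.or_eq_false_iff]
    refine ⟨⟨⟨?_, ?_⟩, ?_⟩, ?_⟩ <;>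
    · rw [← Bool.not_eq_true, PySem.Chars.isIn_iff_infix, List.singleton_infix_iff]
      intro hc
      exact h ⟨_, hc, by simp [bMeta]⟩

theorem join_mySplit (cs : List Char) : PySem.Chars.join ['/'] (mySplit cs) = cs := by
  induction cs with
  | nil => simp [mySplit, PySem.Chars.join_singleton]
  | cons c cs ih =>
    simp only [mySplit]
    by_cases hc : c = '/'
    · rw [if_pos hc]
      cases hms : mySplit cs with
      | nil => exact absurd hms (mySplit_ne_nil cs)
      | cons p ps =>
        rw [PySem.Chars.join_cons_cons]
        rw [hms] at ih
        simp [hc, ih]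
    · rw [if_neg hc]
      cases hms : mySplit cs with
      | nil => exact absurd hms (mySplit_ne_nil cs)
      | cons p ps =>
        rw [hms] at ih
        cases ps with
        | nil => simp_all [PySem.Chars.join_singleton]
        | cons q qs =>
          rw [PySem.Chars.join_cons_cons] at ih ⊢
          simp_all

theorem aGlobRoot_mySplit (cs : List Char) :
    aGlobRoot (mySplit cs) = match refG cs with
      | none => mySplit cs
      | some none => []
      | some (some p) => mySplit p := by
  induction cs with
  | nil => simp [mySplit, refG, aGlobRoot, aHasMeta_eq]
  | cons c cs ih =>
    simp only [mySplit, refG]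
    by_cases hm : bMeta c
    · rw [if_pos hm]
      have hc : ¬ c = '/' := by rintro rfl; simp [bMeta] at hm
      rw [if_neg hc]
      cases hms : mySplit cs with
      | nil => exact absurd hms (mySplit_ne_nil cs)
      | cons p ps => simp [aGlobRoot, aHasMeta_eq, hm]
    · rw [if_neg hm]
      by_cases hc : c = '/'
      · rw [if_pos hc]
        cases hr : refG cs with
        | none => rw [hr] at ih; simp only [aGlobRoot, aHasMeta_eq]; simp [ih]
        | some o =>
          cases o with
          | none =>
            rw [hr] at ih
            simp only [aGlobRoot, aHasMeta_eq]
            simp [ih, hc, mySplit]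
          | some p =>
            rw [hr] at ih
            simp only [aGlobRoot, aHasMeta_eq]
            simp [ih, mySplit, hc]
      · rw [if_neg hc]
        cases hms : mySplit cs with
        | nil => exact absurd hms (mySplit_ne_nil cs)
        | cons p0 ps0 =>
          rw [hms] at ih
          cases hr : refG cs with
          | none =>
            rw [hr] at ih
            simp only [aGlobRoot, aHasMeta_eq] at ih ⊢
            have hp0 : p0.any bMeta = false := by
              by_contra hb
              rw [Bool.not_eq_false] at hb
              rw [if_pos hb] at ih
              exact List.cons_ne_nil _ _ ih.symm
            rw [if_neg (by simp [hp0])] at ih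
            have h2 : aGlobRoot ps0 = ps0 := by simpa using ih
            simp [hm, hp0, h2]
          | some o =>
            cases o with
            | none =>
              rw [hr] at ih
              simp only [aGlobRoot, aHasMeta_eq] at ih ⊢
              have hp0 : p0.any bMeta = true := by
                by_contra hb
                rw [Bool.not_eq_true] at hb
                rw [if_neg (by simp [hb])] at ih
                exact List.cons_ne_nil _ _ ih
              simp [hc, hp0]
            | some p =>
              rw [hr] at ih
              simp only [aGlobRoot, aHasMeta_eq] at ih ⊢
              have hp0 : p0.any bMeta = false := by
                by_contra hb
                rw [Bool.not_eq_false] at hb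
                rw [if_pos hb] at ih
                exact (mySplit_ne_nil p) ih.symm
              rw [if_neg (by simp [hp0])] at ih
              simp only [mySplit, if_neg hc, ← ih]
              simp [hm, hp0]

theorem refG_prefix (cs : List Char) : ∀ (p : List Char), refG cs = some (some p) → p <+: cs := by
  induction cs with
  | nil => intro p h; simp [refG] at h
  | cons c cs ih =>
    intro p h
    simp only [refG] at h
    by_cases hm : bMeta c
    · rw [if_pos hm] at h; simp at h
    · rw [if_neg hm] at h
      cases hr : refG cs with
      | none => rw [hr] at h; simp at h
      | some o =>
        rw [hr] at h
        cases o with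
        | none =>
          by_cases hc : c = '/'
          · rw [if_pos hc] at h
            simp at h
            subst h
            exact List.nil_prefix
          · rw [if_neg hc] at h; simp at h
        | some q =>
          simp at h
          subst h
          exact List.cons_prefix_cons.mpr ⟨rfl, ih q hr⟩

theorem bScan_ref (rest : List Char) : ∀ (pre : List Char) (ls : Int),
    bScan (pre ++ rest) rest (pre.length : Int) ls =
      match refG rest with
      | none => pre ++ rest
      | some none => if 0 ≤ ls then PySem.List.slice (pre ++ rest) none (some ls) else []
      | some (some p) => PySem.List.slice (pre ++ rest) none (some ((pre.length + p.length : Nat) : Int)) := by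
  induction rest with
  | nil => intro pre ls; simp [bScan, refG]
  | cons c rest ih =>
    intro pre ls
    simp only [bScan, refG]
    by_cases hm : bMeta c
    · simp [hm]
    · rw [if_neg hm, if_neg hm]
      have hassoc : pre ++ c :: rest = (pre ++ [c]) ++ rest := by simp
      have hlen : (pre.length : Int) + 1 = (((pre ++ [c]).length : Nat) : Int) := by simp
      by_cases hc : c = '/'
      · subst hc
        rw [if_pos (by simp), hassoc, hlen, ih]
        cases hr : refG rest with
        | none => simp
        | some o =>
          cases o with
          | none =>
            rw [if_pos (by positivity)]
            simp
          | some p =>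
            simp only []
            congr 2
            push_cast [List.length_append, List.length_cons, List.length_nil]
            omega
      · rw [if_neg (by simpa using hc), hassoc, hlen, ih]
        cases hr : refG rest with
        | none => simp
        | some o =>
          cases o with
          | none => simp [hc]
          | some p =>
            simp only []
            congr 2
            push_cast [List.length_append, List.length_cons, List.length_nil]
            omega

theorem glob_eq (pat : String) : aGlob pat = String.ofList (pyOrDot (bGlobRoot pat)) := by
  unfold aGlob bGlobRoot
  have hb := bScan_ref pat.toList [] (-1)
  simp only [List.nil_append, List.length_nil, Nat.cast_zero, Nat.zero_add] at hb
  rw [splitOn_char, aGlobRoot_mySplit]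
  cases hr : refG pat.toList with
  | none => rw [hr] at hb; rw [hb, join_mySplit]
  | some o =>
    cases o with
    | none =>
      rw [hr] at hb
      rw [hb]
      simp [PySem.Chars.join_nil]
    | some p =>
      rw [hr] at hb
      rw [hb, join_mySplit]
      have hpre := refG_prefix pat.toList p hr
      have hs : PySem.List.slice pat.toList none (some ((p.length : Nat) : Int)) = p := by
        rw [PySem.List.slice_to _ (Int.natCast_nonneg _), Int.toNat_natCast]
        exact (List.prefix_iff_eq_take.mp hpre).symm
      simp [hs]

theorem aLoop_eq (l : List (String × String × String)) : ∀ (r d : List String),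
    aLoop l r d =
      (r ++ (l.filter (fun y => y.1 != "rootfilesin")).map (fun y => bRoot y.1 y.2.1),
       d ++ (l.filter (fun y => y.1 == "rootfilesin")).map (fun y => String.ofList (pyOrDot y.2.1.toList))) := by
  induction l with
  | nil => intro r d; simp [aLoop]
  | cons y rest ih =>
    intro r d
    obtain ⟨kind, pat, src⟩ := y
    by_cases h1 : kind = "glob"
    · subst h1
      simp [aLoop, ih, bRoot, glob_eq]
    · by_cases h2 : kind = "relpath" ∨ kind = "path"
      · have hk : (kind != "rootfilesin") = true := by rcases h2 with h|h <;> subst h <;> decide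
        have hk2 : (kind == "rootfilesin") = false := by rcases h2 with h|h <;> subst h <;> decide
        have hbr : bRoot kind pat = String.ofList (pyOrDot pat.toList) := by
          rcases h2 with h|h <;> subst h <;> simp [bRoot]
        simp only [aLoop]
        rw [if_neg (by simp [h1]), if_pos (by rcases h2 with h|h <;> simp [h]), ih]
        simp [hk, hk2, hbr]
      · by_cases h3 : kind = "rootfilesin"
        · subst h3
          simp only [aLoop]
          rw [if_neg (by decide), if_neg (by decide), if_pos (by decide)]
          rw [ih]
          simp
        · rw [not_or] at h2
          have hk : (kind != "rootfilesin") = true := by simpa using h3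
          have hk2 : (kind == "rootfilesin") = false := by simpa using h3
          have hbr : bRoot kind pat = String.ofList ['.'] := by
            simp [bRoot, h1, h2.1, h2.2]
          simp only [aLoop]
          rw [if_neg (by simp [h1]), if_neg (by simp [h2.1, h2.2]), if_neg (by simp [h3]), ih]
          simp [hk, hk2, hbr]

-- ===== VERDICT (by name: the statement is the Claim_ definition above) =====
theorem patternrootsanddirs_py_spec : Claim_equal_patternrootsanddirs_py := by
  intro kindpats _
  unfold Spec_patternrootsanddirs_py patternrootsanddirs_py patternrootsanddirs_py_alt
  rw [aLoop_eq]
  simp
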